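/-
  GENERATED by c/gen_frames.py from gif_FRAMES.txt, the PROGRAM only (the base is in the shared library) — do not edit; re-run the script when the image is rebuilt.

  The 15 protected frames of the image (functions with address-taken locals), as `Asan.FrameLayout`s, each with the
  proof `…_ok : ….OK` (by evaluation) that the two lemmas of Asan/Stack.lean ask for. For a frame F of a function entered with
  rsp = RA (pointing at the return address): base = RA − F.raOff; the prologue's stores are `storesMem mem (base / 8) F.prologue`,
  the epilogue's `storesMem mem (base / 8) F.epilogue`. The comment on each store is the address of the instruction.
-/
import Asan.Stack
namespace Gif.Frames
open Asan

/-- `prog_main` (0x105000): base = [rsp+0x0] = RA − 168, 128 bytes. Description string: "1 32 64 10 report:247". -/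
def prog_main : FrameLayout where
  name := "prog_main"
  fn := 0x105000
  descr := 0x1419a0
  raOff := 168
  size := 128
  objs := [
    ⟨"report", 32, 64⟩]
  prologue := [
    ⟨0, 4, 0xf1f1f1f1⟩  /- 0x10502e -/,
    ⟨12, 4, 0xf3f3f3f3⟩  /- 0x105038 -/]
  epilogue := [
    ⟨0, 4, 0⟩  /- 0x105082 -/,
    ⟨12, 4, 0⟩  /- 0x10508c -/]
  poison := [
    (0, 0xf1), (1, 0xf1), (2, 0xf1), (3, 0xf1), (12, 0xf3), (13, 0xf3), (14, 0xf3), (15, 0xf3)]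

set_option maxRecDepth 100000 in
/-- The layout of `prog_main` satisfies what the prologue / epilogue lemmas need. -/
theorem prog_main_ok : prog_main.OK := by decide

/-- `DGifGetWord` (0x106020): base = [rsp+0x0] = RA − 88, 64 bytes. Description string: "1 32 2 5 c:741". -/
def DGifGetWord : FrameLayout where
  name := "DGifGetWord"
  fn := 0x106020
  descr := 0x141400
  raOff := 88
  size := 64
  objs := [
    ⟨"c", 32, 2⟩]
  prologue := [
    ⟨0, 4, 0xf1f1f1f1⟩  /- 0x10604f -/,
    ⟨4, 4, 0xf3f3f302⟩  /- 0x106059 -/]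
  epilogue := [
    ⟨0, 8, 0⟩  /- 0x10608c -/]
  poison := [
    (0, 0xf1), (1, 0xf1), (2, 0xf1), (3, 0xf1), (4, 0x2), (5, 0xf3), (6, 0xf3), (7, 0xf3)]

set_option maxRecDepth 100000 in
/-- The layout of `DGifGetWord` satisfies what the prologue / epilogue lemmas need. -/
theorem DGifGetWord_ok : DGifGetWord.OK := by decide

/-- `DGifSetupDecompress` (0x106180): base = [rsp+0x0] = RA − 120, 64 bytes. Description string: "1 32 1 12 CodeSize:815". -/
def DGifSetupDecompress : FrameLayout where
  name := "DGifSetupDecompress"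
  fn := 0x106180
  descr := 0x141460
  raOff := 120
  size := 64
  objs := [
    ⟨"CodeSize", 32, 1⟩]
  prologue := [
    ⟨0, 4, 0xf1f1f1f1⟩  /- 0x1061b2 -/,
    ⟨4, 4, 0xf3f3f301⟩  /- 0x1061bd -/]
  epilogue := [
    ⟨0, 8, 0⟩  /- 0x10633a -/]
  poison := [
    (0, 0xf1), (1, 0xf1), (2, 0xf1), (3, 0xf1), (4, 0x1), (5, 0xf3), (6, 0xf3), (7, 0xf3)]

set_option maxRecDepth 100000 in
/-- The layout of `DGifSetupDecompress` satisfies what the prologue / epilogue lemmas need. -/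
theorem DGifSetupDecompress_ok : DGifSetupDecompress.OK := by decide

/-- `DGifDecompressInput` (0x1067a0): base = [rsp+0x0] = RA − 120, 64 bytes. Description string: "1 32 1 13 NextByte:1075". -/
def DGifDecompressInput : FrameLayout where
  name := "DGifDecompressInput"
  fn := 0x1067a0
  descr := 0x1414c0
  raOff := 120
  size := 64
  objs := [
    ⟨"NextByte", 32, 1⟩]
  prologue := [
    ⟨0, 4, 0xf1f1f1f1⟩  /- 0x1067d5 -/,
    ⟨4, 4, 0xf3f3f301⟩  /- 0x1067e0 -/]
  epilogue := [
    ⟨0, 8, 0⟩  /- 0x106874 -/]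
  poison := [
    (0, 0xf1), (1, 0xf1), (2, 0xf1), (3, 0xf1), (4, 0x1), (5, 0xf3), (6, 0xf3), (7, 0xf3)]

set_option maxRecDepth 100000 in
/-- The layout of `DGifDecompressInput` satisfies what the prologue / epilogue lemmas need. -/
theorem DGifDecompressInput_ok : DGifDecompressInput.OK := by decide

/-- `DGifDecompressLine` (0x106ae0): base = [rsp+0x50] = RA − 120, 64 bytes. Description string: "1 32 4 12 CrntCode:863". -/
def DGifDecompressLine : FrameLayout where
  name := "DGifDecompressLine"
  fn := 0x106ae0
  descr := 0x141520
  raOff := 120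
  size := 64
  objs := [
    ⟨"CrntCode", 32, 4⟩]
  prologue := [
    ⟨0, 4, 0xf1f1f1f1⟩  /- 0x106b29 -/,
    ⟨4, 4, 0xf3f3f304⟩  /- 0x106b33 -/]
  epilogue := [
    ⟨0, 8, 0⟩  /- 0x10709d -/]
  poison := [
    (0, 0xf1), (1, 0xf1), (2, 0xf1), (3, 0xf1), (4, 0x4), (5, 0xf3), (6, 0xf3), (7, 0xf3)]

set_option maxRecDepth 100000 in
/-- The layout of `DGifDecompressLine` satisfies what the prologue / epilogue lemmas need. -/
theorem DGifDecompressLine_ok : DGifDecompressLine.OK := by decide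

/-- `DGifGetScreenDesc` (0x108080): base = [rsp+0x0] = RA − 120, 64 bytes. Description string: "1 32 3 7 Buf:251". -/
def DGifGetScreenDesc : FrameLayout where
  name := "DGifGetScreenDesc"
  fn := 0x108080
  descr := 0x141580
  raOff := 120
  size := 64
  objs := [
    ⟨"Buf", 32, 3⟩]
  prologue := [
    ⟨0, 4, 0xf1f1f1f1⟩  /- 0x1080b2 -/,
    ⟨4, 4, 0xf3f3f303⟩  /- 0x1080bc -/]
  epilogue := [
    ⟨0, 8, 0⟩  /- 0x1080f7 -/]
  poison := [
    (0, 0xf1), (1, 0xf1), (2, 0xf1), (3, 0xf1), (4, 0x3), (5, 0xf3), (6, 0xf3), (7, 0xf3)]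

set_option maxRecDepth 100000 in
/-- The layout of `DGifGetScreenDesc` satisfies what the prologue / epilogue lemmas need. -/
theorem DGifGetScreenDesc_ok : DGifGetScreenDesc.OK := by decide

/-- `DGifOpen` (0x108680): base = [rsp+0x0] = RA − 120, 64 bytes. Description string: "1 32 7 7 Buf:168". -/
def DGifOpen : FrameLayout where
  name := "DGifOpen"
  fn := 0x108680
  descr := 0x1415e0
  raOff := 120
  size := 64
  objs := [
    ⟨"Buf", 32, 7⟩]
  prologue := [
    ⟨0, 4, 0xf1f1f1f1⟩  /- 0x1086b8 -/,
    ⟨4, 4, 0xf3f3f307⟩  /- 0x1086c4 -/]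
  epilogue := [
    ⟨0, 8, 0⟩  /- 0x108816 -/]
  poison := [
    (0, 0xf1), (1, 0xf1), (2, 0xf1), (3, 0xf1), (4, 0x7), (5, 0xf3), (6, 0xf3), (7, 0xf3)]

set_option maxRecDepth 100000 in
/-- The layout of `DGifOpen` satisfies what the prologue / epilogue lemmas need. -/
theorem DGifOpen_ok : DGifOpen.OK := by decide

/-- `DGifGetRecordType` (0x108b80): base = [rsp+0x0] = RA − 104, 64 bytes. Description string: "1 32 1 7 Buf:326". -/
def DGifGetRecordType : FrameLayout where
  name := "DGifGetRecordType"
  fn := 0x108b80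
  descr := 0x141640
  raOff := 104
  size := 64
  objs := [
    ⟨"Buf", 32, 1⟩]
  prologue := [
    ⟨0, 4, 0xf1f1f1f1⟩  /- 0x108bb1 -/,
    ⟨4, 4, 0xf3f3f301⟩  /- 0x108bbd -/]
  epilogue := [
    ⟨0, 8, 0⟩  /- 0x108bf5 -/]
  poison := [
    (0, 0xf1), (1, 0xf1), (2, 0xf1), (3, 0xf1), (4, 0x1), (5, 0xf3), (6, 0xf3), (7, 0xf3)]

set_option maxRecDepth 100000 in
/-- The layout of `DGifGetRecordType` satisfies what the prologue / epilogue lemmas need. -/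
theorem DGifGetRecordType_ok : DGifGetRecordType.OK := by decide

/-- `DGifGetImageHeader` (0x108e00): base = [rsp+0x10] = RA − 120, 64 bytes. Description string: "1 32 3 7 Buf:363". -/
def DGifGetImageHeader : FrameLayout where
  name := "DGifGetImageHeader"
  fn := 0x108e00
  descr := 0x1416a0
  raOff := 120
  size := 64
  objs := [
    ⟨"Buf", 32, 3⟩]
  prologue := [
    ⟨0, 4, 0xf1f1f1f1⟩  /- 0x108e35 -/,
    ⟨4, 4, 0xf3f3f303⟩  /- 0x108e3f -/]
  epilogue := [
    ⟨0, 8, 0⟩  /- 0x108e78 -/]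
  poison := [
    (0, 0xf1), (1, 0xf1), (2, 0xf1), (3, 0xf1), (4, 0x3), (5, 0xf3), (6, 0xf3), (7, 0xf3)]

set_option maxRecDepth 100000 in
/-- The layout of `DGifGetImageHeader` satisfies what the prologue / epilogue lemmas need. -/
theorem DGifGetImageHeader_ok : DGifGetImageHeader.OK := by decide

/-- `DGifGetExtensionNext` (0x109820): base = [rsp+0x10] = RA − 120, 64 bytes. Description string: "1 32 1 7 Buf:599". -/
def DGifGetExtensionNext : FrameLayout where
  name := "DGifGetExtensionNext"
  fn := 0x109820
  descr := 0x141700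
  raOff := 120
  size := 64
  objs := [
    ⟨"Buf", 32, 1⟩]
  prologue := [
    ⟨0, 4, 0xf1f1f1f1⟩  /- 0x109858 -/,
    ⟨4, 4, 0xf3f3f301⟩  /- 0x109862 -/]
  epilogue := [
    ⟨0, 8, 0⟩  /- 0x1098a6 -/]
  poison := [
    (0, 0xf1), (1, 0xf1), (2, 0xf1), (3, 0xf1), (4, 0x1), (5, 0xf3), (6, 0xf3), (7, 0xf3)]

set_option maxRecDepth 100000 in
/-- The layout of `DGifGetExtensionNext` satisfies what the prologue / epilogue lemmas need. -/
theorem DGifGetExtensionNext_ok : DGifGetExtensionNext.OK := by decide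

/-- `DGifGetExtension` (0x109a80): base = [rsp+0x0] = RA − 104, 64 bytes. Description string: "1 32 1 7 Buf:571". -/
def DGifGetExtension : FrameLayout where
  name := "DGifGetExtension"
  fn := 0x109a80
  descr := 0x141760
  raOff := 104
  size := 64
  objs := [
    ⟨"Buf", 32, 1⟩]
  prologue := [
    ⟨0, 4, 0xf1f1f1f1⟩  /- 0x109ab6 -/,
    ⟨4, 4, 0xf3f3f301⟩  /- 0x109ac0 -/]
  epilogue := [
    ⟨0, 8, 0⟩  /- 0x109afb -/]
  poison := [
    (0, 0xf1), (1, 0xf1), (2, 0xf1), (3, 0xf1), (4, 0x1), (5, 0xf3), (6, 0xf3), (7, 0xf3)]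

set_option maxRecDepth 100000 in
/-- The layout of `DGifGetExtension` satisfies what the prologue / epilogue lemmas need. -/
theorem DGifGetExtension_ok : DGifGetExtension.OK := by decide

/-- `DGifGetCodeNext` (0x109f40): base = [rsp+0x10] = RA − 120, 64 bytes. Description string: "1 32 1 7 Buf:780". -/
def DGifGetCodeNext : FrameLayout where
  name := "DGifGetCodeNext"
  fn := 0x109f40
  descr := 0x1417c0
  raOff := 120
  size := 64
  objs := [
    ⟨"Buf", 32, 1⟩]
  prologue := [
    ⟨0, 4, 0xf1f1f1f1⟩  /- 0x109f78 -/,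
    ⟨4, 4, 0xf3f3f301⟩  /- 0x109f82 -/]
  epilogue := [
    ⟨0, 8, 0⟩  /- 0x109fc6 -/]
  poison := [
    (0, 0xf1), (1, 0xf1), (2, 0xf1), (3, 0xf1), (4, 0x1), (5, 0xf3), (6, 0xf3), (7, 0xf3)]

set_option maxRecDepth 100000 in
/-- The layout of `DGifGetCodeNext` satisfies what the prologue / epilogue lemmas need. -/
theorem DGifGetCodeNext_ok : DGifGetCodeNext.OK := by decide

/-- `DGifGetLine` (0x10a1e0): base = [rsp+0x0] = RA − 120, 64 bytes. Description string: "1 32 8 9 Dummy:485". -/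
def DGifGetLine : FrameLayout where
  name := "DGifGetLine"
  fn := 0x10a1e0
  descr := 0x141820
  raOff := 120
  size := 64
  objs := [
    ⟨"Dummy", 32, 8⟩]
  prologue := [
    ⟨0, 4, 0xf1f1f1f1⟩  /- 0x10a218 -/,
    ⟨4, 4, 0xf3f3f300⟩  /- 0x10a224 -/]
  epilogue := [
    ⟨0, 8, 0⟩  /- 0x10a28e -/]
  poison := [
    (0, 0xf1), (1, 0xf1), (2, 0xf1), (3, 0xf1), (5, 0xf3), (6, 0xf3), (7, 0xf3)]

set_option maxRecDepth 100000 in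
/-- The layout of `DGifGetLine` satisfies what the prologue / epilogue lemmas need. -/
theorem DGifGetLine_ok : DGifGetLine.OK := by decide

/-- `DGifSlurp` (0x10a680): base = [rsp+0x0] = RA − 152, 96 bytes. Description string: "3 32 4 15 RecordType:1188 48 4 16 ExtFunction:1191 64 8 12 ExtData:1190". -/
def DGifSlurp : FrameLayout where
  name := "DGifSlurp"
  fn := 0x10a680
  descr := 0x141880
  raOff := 152
  size := 96
  objs := [
    ⟨"RecordType", 32, 4⟩,
    ⟨"ExtFunction", 48, 4⟩,
    ⟨"ExtData", 64, 8⟩]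
  prologue := [
    ⟨0, 4, 0xf1f1f1f1⟩  /- 0x10a6b2 -/,
    ⟨4, 4, 0xf204f204⟩  /- 0x10a6bd -/,
    ⟨8, 4, 0xf3f3f300⟩  /- 0x10a6c8 -/]
  epilogue := [
    ⟨0, 8, 0⟩  /- 0x10a8ed -/,
    ⟨8, 4, 0⟩  /- 0x10a8f8 -/]
  poison := [
    (0, 0xf1), (1, 0xf1), (2, 0xf1), (3, 0xf1), (4, 0x4), (5, 0xf2), (6, 0x4), (7, 0xf2),
    (9, 0xf3), (10, 0xf3), (11, 0xf3)]

set_option maxRecDepth 100000 in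
/-- The layout of `DGifSlurp` satisfies what the prologue / epilogue lemmas need. -/
theorem DGifSlurp_ok : DGifSlurp.OK := by decide

/-- `gif_decode` (0x10ad80): base = [rsp+0x0] = RA − 136, 96 bytes. Description string: "2 48 4 9 error:183 64 16 10 cursor:181". -/
def gif_decode : FrameLayout where
  name := "gif_decode"
  fn := 0x10ad80
  descr := 0x141920
  raOff := 136
  size := 96
  objs := [
    ⟨"error", 48, 4⟩,
    ⟨"cursor", 64, 16⟩]
  prologue := [
    ⟨0, 4, 0xf1f1f1f1⟩  /- 0x10adb6 -/,
    ⟨4, 4, 0xf204f1f1⟩  /- 0x10adc2 -/,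
    ⟨8, 4, 0xf3f30000⟩  /- 0x10adce -/]
  epilogue := [
    ⟨0, 8, 0⟩  /- 0x10afdb -/,
    ⟨8, 4, 0⟩  /- 0x10afe7 -/]
  poison := [
    (0, 0xf1), (1, 0xf1), (2, 0xf1), (3, 0xf1), (4, 0xf1), (5, 0xf1), (6, 0x4), (7, 0xf2),
    (10, 0xf3), (11, 0xf3)]

set_option maxRecDepth 100000 in
/-- The layout of `gif_decode` satisfies what the prologue / epilogue lemmas need. -/
theorem gif_decode_ok : gif_decode.OK := by decide

/-- The protected frames of the image. -/
def all : List FrameLayout := [prog_main, DGifGetWord, DGifSetupDecompress, DGifDecompressInput, DGifDecompressLine, DGifGetScreenDesc, DGifOpen, DGifGetRecordType, DGifGetImageHeader, DGifGetExtensionNext, DGifGetExtension, DGifGetCodeNext, DGifGetLine, DGifSlurp, gif_decode]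

/-- Every protected frame of the image is well formed. -/
theorem all_ok : ∀ F, F ∈ all → F.OK := by
  intro F hF
  simp only [all, List.mem_cons, List.not_mem_nil, or_false] at hF
  rcases hF with rfl | rfl | rfl | rfl | rfl | rfl | rfl | rfl | rfl | rfl | rfl | rfl | rfl | rfl | rfl
  · exact prog_main_ok
  · exact DGifGetWord_ok
  · exact DGifSetupDecompress_ok
  · exact DGifDecompressInput_ok
  · exact DGifDecompressLine_ok
  · exact DGifGetScreenDesc_ok
  · exact DGifOpen_ok
  · exact DGifGetRecordType_ok
  · exact DGifGetImageHeader_ok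
  · exact DGifGetExtensionNext_ok
  · exact DGifGetExtension_ok
  · exact DGifGetCodeNext_ok
  · exact DGifGetLine_ok
  · exact DGifSlurp_ok
  · exact gif_decode_ok

end Gif.Frames
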